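-- pv_equiv track=rewrite | github.com/kyungminkim-dev/Algorithm_Problem | Problems/2021카카오공채2번.py | solution
-- ===== SOURCE A (Python) =====
-- from itertools import combinations
-- from collections import Counter
--
-- def solution(orders, course):
--     answer = []
--     for i in range(len(orders)):
--         temp = ''.join(sorted(list(orders[i])))
--         orders[i] = temp
--
--     for num in course: #course의 음식 수
--         all_list = []
--         for order in orders:
--             temp = list(map(lambda x : ''.join(x), list(combinations(order,num))))
--             all_list.extend(temp)
--
--         if not all_list:
--             continue
--
--         counter = Counter(all_list)
--         max_num = counter.most_common(1)[0][1]
--         if max_num < 2: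
--             continue
--         for k,v in counter.items():
--             if v == max_num:
--                 answer.append(k)
--     answer.sort()
--     return answer
-- ===== SOURCE B (Python) =====
-- from itertools import combinations
--
-- def solution(orders, course):
--     orders[:] = [''.join(sorted(o)) for o in orders]
--     answer = []
--     for num in course:
--         pool = sorted(''.join(c) for order in orders for c in combinations(order, num))
--         best = 0
--         picks = []
--         i, n = 0, len(pool)
--         while i < n:
--             j = i
--             while j < n and pool[j] == pool[i]:
--                 j += 1
--             run = j - i
--             if run > best:
--                 best = run
--                 picks = [pool[i]]
--             elif run == best:
--                 picks.append(pool[i])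
--             i = j
--         if best >= 2:
--             answer.extend(picks)
--     answer.sort()
--     return answer
-- ===== Notes on version B (the rewrite author's own statement) =====
-- stated objective: alternative
-- what changed: A counts each size's combinations with a hash Counter and reads the max via most_common; B removes the Counter entirely: it sorts the flat combination list and finds the maximal run and all run values achieving it in one index-based run-length scan with a running maximum.
import Mathlib
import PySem

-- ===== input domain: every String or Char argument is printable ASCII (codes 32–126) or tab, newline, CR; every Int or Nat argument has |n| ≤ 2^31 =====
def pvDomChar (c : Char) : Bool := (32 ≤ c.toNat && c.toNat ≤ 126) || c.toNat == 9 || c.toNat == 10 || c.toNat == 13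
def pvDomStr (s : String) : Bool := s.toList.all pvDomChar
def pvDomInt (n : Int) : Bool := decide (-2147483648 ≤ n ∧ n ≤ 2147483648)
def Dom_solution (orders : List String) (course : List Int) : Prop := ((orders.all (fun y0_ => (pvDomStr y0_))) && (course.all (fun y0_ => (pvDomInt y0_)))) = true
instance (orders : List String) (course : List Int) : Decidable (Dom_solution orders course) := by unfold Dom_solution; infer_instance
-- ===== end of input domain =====

-- B replaces A's hash Counter and most_common with sorting the flat combination list and one
-- run-length scan keeping a running maximum (objective: alternative algorithm, similar cost).
-- Both programs normalize `orders` in place identically; the equivalence proved is about the return value.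

-- ===== PORT A =====
-- ''.join(sorted(list(s)))
def pvNorm (s : String) : String := String.ofList (PySem.List.sorted s.toList (fun c => c) false)

def solution (orders : List String) (course : List Int) : List String :=
  -- first loop: for i in range(len(orders)): orders[i] = ''.join(sorted(list(orders[i])))  — rewrites each element
  let orders2 := orders.map pvNorm
  let answer := course.foldl (fun answer num =>
    let all_list := orders2.foldl (fun acc order =>
        acc ++ (PySem.List.combinations order.toList num.toNat).map (fun t => String.ofList t)) []
    if all_list.isEmpty then answer
    else
      let counter := PySem.Dict.counter all_list
      -- counter.most_common(1)[0][1]: the count of a first maximal-count item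
      let max_num := ((PySem.List.max? counter.items (fun kv => kv.2)).map (fun kv => kv.2)).getD 0
      if max_num < 2 then answer
      else counter.items.foldl (fun answer kv => if kv.2 == max_num then answer ++ [kv.1] else answer) answer) []
  PySem.List.sorted answer (fun s => s) false

-- ===== PORT B =====
-- B's pair of while loops: scan the sorted pool run by run, keeping the best run length and the
-- values achieving it ('i' advancing to 'j' = dropping the leading run of equal strings)
def pvRunScanGo : List String → Int → List String → Int × List String
  | [], best, picks => (best, picks)
  | x :: rest, best, picks =>
    let run : Int := 1 + (rest.takeWhile (fun y => y == x)).length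
    if best < run then pvRunScanGo (rest.dropWhile (fun y => y == x)) run [x]
    else if run == best then pvRunScanGo (rest.dropWhile (fun y => y == x)) best (picks ++ [x])
    else pvRunScanGo (rest.dropWhile (fun y => y == x)) best picks
termination_by pool => pool.length
decreasing_by all_goals exact Nat.lt_succ_of_le (List.length_dropWhile_le _ _)

def solution_alt (orders : List String) (course : List Int) : List String :=
  let orders2 := orders.map pvNorm
  let answer := course.foldl (fun answer num =>
    let pool := PySem.List.sorted (orders2.flatMap (fun order =>
        (PySem.List.combinations order.toList num.toNat).map (fun c => String.ofList c))) (fun s => s) false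
    let bp := pvRunScanGo pool 0 []
    if 2 ≤ bp.1 then answer ++ bp.2 else answer) []
  PySem.List.sorted answer (fun s => s) false

-- ===== PRECONDITION & SPEC =====
-- Pre_ excludes a negative size in course combined with a nonempty orders list: there itertools.combinations raises ValueError in A (and in B); with orders = [] no combination is ever formed and both return.
def Pre_solution (orders : List String) (course : List Int) : Prop := orders = [] ∨ ∀ n ∈ course, 0 ≤ n
instance (orders : List String) (course : List Int) : Decidable (Pre_solution orders course) := by unfold Pre_solution; infer_instance
def pvWitness_solution : List String × List Int := (["abc", "bca"], [2])

def Spec_solution (orders : List String) (course : List Int) (out : List String) : Prop := out = solution_alt orders course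
instance (orders : List String) (course : List Int) (out : List String) : Decidable (Spec_solution orders course out) := by unfold Spec_solution; infer_instance

-- ===== CLAIM (what is proved, stated in full; the proofs are below) =====
def Claim_equal_solution : Prop := ∀ (orders : List String) (course : List Int), Dom_solution orders course → Pre_solution orders course → Spec_solution orders course (solution orders course)

-- ===== LEMMAS AND PROOFS =====

-- the flat list of all size-r combinations both programs generate
def pvAllList (orders2 : List String) (r : Nat) : List String :=
  orders2.flatMap (fun o => (PySem.List.combinations o.toList r).map (fun t => String.ofList t))

-- what A appends for one course entry
def pvContribA (l : List String) : List String :=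
  if l.isEmpty then []
  else
    let counter := PySem.Dict.counter l
    let max_num : Int := ((PySem.List.max? counter.items (fun kv => kv.2)).map (fun kv => kv.2)).getD 0
    if max_num < 2 then []
    else (counter.items.filter (fun kv => kv.2 == max_num)).map (fun kv => kv.1)

-- what B appends for one course entry
def pvContribB (l : List String) : List String :=
  let bp := pvRunScanGo (PySem.List.sorted l (fun s => s) false) 0 []
  if 2 ≤ bp.1 then bp.2 else []

lemma pvA_shape (orders2 : List String) (course : List Int) :
    course.foldl (fun answer num =>
      let all_list := orders2.foldl (fun acc order =>
          acc ++ (PySem.List.combinations order.toList num.toNat).map (fun t => String.ofList t)) []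
      if all_list.isEmpty then answer
      else
        let counter := PySem.Dict.counter all_list
        let max_num := ((PySem.List.max? counter.items (fun kv => kv.2)).map (fun kv => kv.2)).getD 0
        if max_num < 2 then answer
        else counter.items.foldl (fun answer kv => if kv.2 == max_num then answer ++ [kv.1] else answer) answer) []
    = course.foldl (fun answer num => answer ++ pvContribA (pvAllList orders2 num.toNat)) [] := by
  apply PySem.List.foldl_congr_mem
  intro ans num _
  have hall : (orders2.foldl (fun acc order =>
      acc ++ (PySem.List.combinations order.toList num.toNat).map (fun t => String.ofList t)) [])
      = pvAllList orders2 num.toNat := by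
    rw [PySem.List.foldl_append_eq_flatMap, List.nil_append, pvAllList]
  simp only [hall, pvContribA]
  split_ifs with h1 h2
  · simp
  · simp
  · rw [PySem.List.foldl_append_if]

lemma pvB_shape (orders2 : List String) (course : List Int) :
    course.foldl (fun answer num =>
      let pool := PySem.List.sorted (orders2.flatMap (fun order =>
          (PySem.List.combinations order.toList num.toNat).map (fun c => String.ofList c))) (fun s => s) false
      let bp := pvRunScanGo pool 0 []
      if 2 ≤ bp.1 then answer ++ bp.2 else answer) []
    = course.foldl (fun answer num => answer ++ pvContribB (pvAllList orders2 num.toNat)) [] := by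
  apply PySem.List.foldl_congr_mem
  intro ans num _
  simp only [pvContribB, pvAllList]
  split_ifs with h1
  · rfl
  · simp

-- the run scan's full characterization on a sorted pool
lemma pv_step_facts (x : String) (rest : List String) (hs : (x :: rest).Pairwise (fun a b => a ≤ b)) :
    (rest.dropWhile (fun y => y == x)).Pairwise (fun a b => a ≤ b) ∧
    (∀ y ∈ rest.dropWhile (fun y => y == x), x < y) ∧
    ((x :: rest).count x = 1 + (rest.takeWhile (fun y => y == x)).length) ∧
    (∀ y, y ≠ x → (x :: rest).count y = (rest.dropWhile (fun y => y == x)).count y) ∧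
    (∀ y ∈ rest.dropWhile (fun y => y == x), y ∈ x :: rest) := by
  rw [List.pairwise_cons] at hs
  obtain ⟨hx_le, hrest⟩ := hs
  have hsubl : (rest.dropWhile (fun y => y == x)).Sublist rest := List.dropWhile_sublist _
  have hRpair : (rest.dropWhile (fun y => y == x)).Pairwise (fun a b => a ≤ b) := hrest.sublist hsubl
  have hT : ∀ y ∈ rest.takeWhile (fun y => y == x), y = x := by
    intro y hy
    have := List.mem_takeWhile_imp hy
    simpa using this
  have hlt : ∀ y ∈ rest.dropWhile (fun y => y == x), x < y := by
    cases hR : rest.dropWhile (fun y => y == x) with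
    | nil => intro y hy; simp at hy
    | cons h0 t =>
        have hph : (fun y => y == x) h0 = false := by
          have := List.head?_dropWhile_not (fun y => y == x) rest
          rw [hR] at this; simpa using this
        have hne : h0 ≠ x := by simpa using hph
        have hle0 : x ≤ h0 := hx_le _ (hsubl.mem (hR ▸ List.mem_cons_self))
        have hlt0 : x < h0 := lt_of_le_of_ne hle0 (Ne.symm hne)
        intro y hy
        rcases List.mem_cons.mp hy with rfl | hy
        · exact hlt0
        · have : h0 ≤ y := by
            have := hR ▸ hRpair
            exact (List.pairwise_cons.mp this).1 y hy
          exact lt_of_lt_of_le hlt0 this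
  have hxnotR : x ∉ rest.dropWhile (fun y => y == x) := fun hmem => lt_irrefl x (hlt x hmem)
  have hsplit : rest.takeWhile (fun y => y == x) ++ rest.dropWhile (fun y => y == x) = rest :=
    List.takeWhile_append_dropWhile
  refine ⟨hRpair, hlt, ?_, ?_, ?_⟩
  · have hTc : (rest.takeWhile (fun y => y == x)).count x = (rest.takeWhile (fun y => y == x)).length := by
      rw [List.count_eq_length]
      intro b hb; exact (hT b hb).symm
    have hrc : rest.count x = (rest.takeWhile (fun y => y == x)).length := by
      conv_lhs => rw [← hsplit]
      rw [List.count_append, List.count_eq_zero.mpr hxnotR, hTc]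
      omega
    simp [hrc]
    omega
  · intro y hy
    have hTy : (rest.takeWhile (fun y => y == x)).count y = 0 := by
      rw [List.count_eq_zero]
      intro hmem; exact hy (hT y hmem)
    have hrc : rest.count y = (rest.dropWhile (fun y => y == x)).count y := by
      conv_lhs => rw [← hsplit]
      rw [List.count_append, hTy]
      omega
    simp [hrc, Ne.symm hy]
  · intro y hy
    exact List.mem_cons_of_mem x (hsubl.mem hy)

lemma pv_go_cons_lt (x : String) (rest : List String) (best : Int) (picks : List String)
    (h : best < 1 + ((rest.takeWhile (fun y => y == x)).length : Int)) :
    pvRunScanGo (x :: rest) best picks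
      = pvRunScanGo (rest.dropWhile (fun y => y == x)) (1 + ((rest.takeWhile (fun y => y == x)).length : Int)) [x] := by
  rw [pvRunScanGo]; simp [h]

lemma pv_go_cons_eq (x : String) (rest : List String) (best : Int) (picks : List String)
    (h : 1 + ((rest.takeWhile (fun y => y == x)).length : Int) = best) :
    pvRunScanGo (x :: rest) best picks
      = pvRunScanGo (rest.dropWhile (fun y => y == x)) best (picks ++ [x]) := by
  rw [pvRunScanGo]; simp [h]

lemma pv_go_cons_gt (x : String) (rest : List String) (best : Int) (picks : List String)
    (h : 1 + ((rest.takeWhile (fun y => y == x)).length : Int) < best) :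
    pvRunScanGo (x :: rest) best picks
      = pvRunScanGo (rest.dropWhile (fun y => y == x)) best picks := by
  rw [pvRunScanGo]
  have h1 : ¬ best < 1 + ((rest.takeWhile (fun y => y == x)).length : Int) := by omega
  have h2 : 1 + ((rest.takeWhile (fun y => y == x)).length : Int) ≠ best := by omega
  simp [h1, h2]

lemma pv_go_spec : ∀ (pool : List String) (best : Int) (picks : List String),
    pool.Pairwise (fun a b => a ≤ b) → 0 ≤ best → (∀ y ∈ picks, y ∉ pool) → picks.Nodup →
    (best ≤ (pvRunScanGo pool best picks).1) ∧
    (∀ y ∈ pool, (pool.count y : Int) ≤ (pvRunScanGo pool best picks).1) ∧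
    ((pvRunScanGo pool best picks).1 = best ∨ ∃ y ∈ pool, (pool.count y : Int) = (pvRunScanGo pool best picks).1) ∧
    (∀ y, y ∈ (pvRunScanGo pool best picks).2 ↔
      ((y ∈ picks ∧ (pvRunScanGo pool best picks).1 = best) ∨
       (y ∈ pool ∧ (pool.count y : Int) = (pvRunScanGo pool best picks).1))) ∧
    (pvRunScanGo pool best picks).2.Nodup := by
  suffices H : ∀ (n : Nat) (pool : List String), pool.length ≤ n → ∀ (best : Int) (picks : List String),
      pool.Pairwise (fun a b => a ≤ b) → 0 ≤ best → (∀ y ∈ picks, y ∉ pool) → picks.Nodup →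
      (best ≤ (pvRunScanGo pool best picks).1) ∧
      (∀ y ∈ pool, (pool.count y : Int) ≤ (pvRunScanGo pool best picks).1) ∧
      ((pvRunScanGo pool best picks).1 = best ∨ ∃ y ∈ pool, (pool.count y : Int) = (pvRunScanGo pool best picks).1) ∧
      (∀ y, y ∈ (pvRunScanGo pool best picks).2 ↔
        ((y ∈ picks ∧ (pvRunScanGo pool best picks).1 = best) ∨
         (y ∈ pool ∧ (pool.count y : Int) = (pvRunScanGo pool best picks).1))) ∧
      (pvRunScanGo pool best picks).2.Nodup by
    intro pool best picks
    exact H pool.length pool (le_refl _) best picks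
  intro n
  induction n with
  | zero =>
      intro pool hlen best picks _ hb _ hnd
      have hpool : pool = [] := List.eq_nil_of_length_eq_zero (Nat.le_zero.mp hlen)
      subst hpool
      refine ⟨by simp [pvRunScanGo], by simp, Or.inl (by simp [pvRunScanGo]), ?_, by simp [pvRunScanGo, hnd]⟩
      intro y; simp [pvRunScanGo]
  | succ n ihn =>
    intro pool hlen best picks hs hb hdisj hnd
    match pool, hlen, hs, hdisj with
    | [], _, _, _ =>
      refine ⟨by simp [pvRunScanGo], by simp, Or.inl (by simp [pvRunScanGo]), ?_, by simp [pvRunScanGo, hnd]⟩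
      intro y; simp [pvRunScanGo]
    | x :: rest, hlen, hs, hdisj =>
      have hRlen : (rest.dropWhile (fun y => y == x)).length ≤ n := by
        have h1 := List.length_dropWhile_le (fun y => y == x) rest
        simp at hlen; omega
      rcases lt_trichotomy best (1 + ((rest.takeWhile (fun y => y == x)).length : Int)) with hltr | heqr | hgtr
      · obtain ⟨hRp, hltR, hcx, hcy, hRsub⟩ := pv_step_facts x rest hs
        have hx0 : x ∉ rest.dropWhile (fun y => y == x) := fun h => lt_irrefl x (hltR x h)
        rw [pv_go_cons_lt x rest best picks hltr]
        have hcxI : (((x :: rest).count x : Int)) = 1 + ((rest.takeWhile (fun y => y == x)).length : Int) := by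
          rw [hcx]; push_cast; ring
        have hmemR : ∀ y, y ∈ x :: rest → y ≠ x → y ∈ rest.dropWhile (fun y => y == x) := by
          intro y hy hne
          have h1 : 0 < (x :: rest).count y := List.count_pos_iff.mpr hy
          rw [hcy y hne] at h1
          exact List.count_pos_iff.mp h1
        obtain ⟨ih1, ih2, ih3, ih4, ih5⟩ :=
          ihn _ hRlen (1 + ((rest.takeWhile (fun y => y == x)).length : Int)) [x] hRp (by positivity)
            (by intro y hy; rw [List.mem_singleton] at hy; subst hy; exact hx0) (List.nodup_singleton x)
        refine ⟨by omega, ?_, ?_, ?_, ih5⟩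
        · intro y hy
          by_cases hyx : y = x
          · subst hyx; omega
          · have hcc := hcy y hyx
            have := ih2 y (hmemR y hy hyx)
            omega
        · right
          rcases ih3 with h | ⟨y, hy, hc⟩
          · exact ⟨x, List.mem_cons_self, by omega⟩
          · have hcc := hcy y (ne_of_gt (hltR y hy))
            exact ⟨y, hRsub y hy, by omega⟩
        · intro y
          rw [ih4 y]
          constructor
          · rintro (⟨hyx, hr⟩ | ⟨hyR, hc⟩)
            · rw [List.mem_singleton] at hyx; subst hyx
              exact Or.inr ⟨List.mem_cons_self, by omega⟩
            · have hcc := hcy y (ne_of_gt (hltR y hyR))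
              exact Or.inr ⟨hRsub y hyR, by omega⟩
          · rintro (⟨_, hr⟩ | ⟨hyP, hc⟩)
            · exact absurd hr (by omega)
            · by_cases hyx : y = x
              · subst hyx
                exact Or.inl ⟨List.mem_singleton.mpr rfl, by omega⟩
              · have hcc := hcy y hyx
                exact Or.inr ⟨hmemR y hyP hyx, by omega⟩
      · obtain ⟨hRp, hltR, hcx, hcy, hRsub⟩ := pv_step_facts x rest hs
        have hx0 : x ∉ rest.dropWhile (fun y => y == x) := fun h => lt_irrefl x (hltR x h)
        rw [pv_go_cons_eq x rest best picks heqr.symm]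
        have hcxI : (((x :: rest).count x : Int)) = 1 + ((rest.takeWhile (fun y => y == x)).length : Int) := by
          rw [hcx]; push_cast; ring
        have hmemR : ∀ y, y ∈ x :: rest → y ≠ x → y ∈ rest.dropWhile (fun y => y == x) := by
          intro y hy hne
          have h1 : 0 < (x :: rest).count y := List.count_pos_iff.mpr hy
          rw [hcy y hne] at h1
          exact List.count_pos_iff.mp h1
        have hxnp : x ∉ picks := fun hxp => hdisj x hxp List.mem_cons_self
        obtain ⟨ih1, ih2, ih3, ih4, ih5⟩ :=
          ihn _ hRlen best (picks ++ [x]) hRp hb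
            (by intro y hy
                rcases List.mem_append.mp hy with hy | hy
                · exact fun hyR => hdisj y hy (hRsub y hyR)
                · rw [List.mem_singleton] at hy; subst hy; exact hx0)
            (by rw [List.nodup_append]
                exact ⟨hnd, List.nodup_singleton x,
                  by intro a ha b hb
                     rw [List.mem_singleton] at hb; subst hb
                     exact fun h => hxnp (h ▸ ha)⟩)
        refine ⟨ih1, ?_, ?_, ?_, ih5⟩
        · intro y hy
          by_cases hyx : y = x
          · subst hyx; omega
          · have hcc := hcy y hyx
            have := ih2 y (hmemR y hy hyx)
            omega
        · rcases ih3 with h | ⟨y, hy, hc⟩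
          · exact Or.inl h
          · have hcc := hcy y (ne_of_gt (hltR y hy))
            exact Or.inr ⟨y, hRsub y hy, by omega⟩
        · intro y
          rw [ih4 y]
          constructor
          · rintro (⟨hyp, hr⟩ | ⟨hyR, hc⟩)
            · rcases List.mem_append.mp hyp with hyp | hyp
              · exact Or.inl ⟨hyp, hr⟩
              · rw [List.mem_singleton] at hyp; subst hyp
                exact Or.inr ⟨List.mem_cons_self, by omega⟩
            · have hcc := hcy y (ne_of_gt (hltR y hyR))
              exact Or.inr ⟨hRsub y hyR, by omega⟩
          · rintro (⟨hyp, hr⟩ | ⟨hyP, hc⟩)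
            · exact Or.inl ⟨List.mem_append_left _ hyp, hr⟩
            · by_cases hyx : y = x
              · subst hyx
                exact Or.inl ⟨List.mem_append_right _ (List.mem_singleton.mpr rfl), by omega⟩
              · have hcc := hcy y hyx
                exact Or.inr ⟨hmemR y hyP hyx, by omega⟩
      · obtain ⟨hRp, hltR, hcx, hcy, hRsub⟩ := pv_step_facts x rest hs
        rw [pv_go_cons_gt x rest best picks hgtr]
        have hcxI : (((x :: rest).count x : Int)) = 1 + ((rest.takeWhile (fun y => y == x)).length : Int) := by
          rw [hcx]; push_cast; ring
        have hmemR : ∀ y, y ∈ x :: rest → y ≠ x → y ∈ rest.dropWhile (fun y => y == x) := by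
          intro y hy hne
          have h1 : 0 < (x :: rest).count y := List.count_pos_iff.mpr hy
          rw [hcy y hne] at h1
          exact List.count_pos_iff.mp h1
        obtain ⟨ih1, ih2, ih3, ih4, ih5⟩ :=
          ihn _ hRlen best picks hRp hb
            (by intro y hy hyR; exact hdisj y hy (hRsub y hyR)) hnd
        refine ⟨ih1, ?_, ?_, ?_, ih5⟩
        · intro y hy
          by_cases hyx : y = x
          · subst hyx; omega
          · have hcc := hcy y hyx
            have := ih2 y (hmemR y hy hyx)
            omega
        · rcases ih3 with h | ⟨y, hy, hc⟩
          · exact Or.inl h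
          · have hcc := hcy y (ne_of_gt (hltR y hy))
            exact Or.inr ⟨y, hRsub y hy, by omega⟩
        · intro y
          rw [ih4 y]
          constructor
          · rintro (⟨hyp, hr⟩ | ⟨hyR, hc⟩)
            · exact Or.inl ⟨hyp, hr⟩
            · have hcc := hcy y (ne_of_gt (hltR y hyR))
              exact Or.inr ⟨hRsub y hyR, by omega⟩
          · rintro (⟨hyp, hr⟩ | ⟨hyP, hc⟩)
            · exact Or.inl ⟨hyp, hr⟩
            · by_cases hyx : y = x
              · subst hyx; omega
              · have hcc := hcy y hyx
                exact Or.inr ⟨hmemR y hyP hyx, by omega⟩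

lemma pv_contrib_perm (l : List String) : (pvContribA l).Perm (pvContribB l) := by
  cases l with
  | nil =>
    have hB : pvContribB [] = [] := by
      simp [pvContribB, pvRunScanGo, PySem.List.sorted]
    rw [hB]
    have hA : pvContribA [] = [] := rfl
    rw [hA]
  | cons z t =>
    have hsp : (PySem.List.sorted (z :: t) (fun s => s) false).Pairwise (fun a b => a ≤ b) := by
      simpa using PySem.List.sorted_pairwise (z :: t) (fun s : String => s)
    have hperm : (PySem.List.sorted (z :: t) (fun s => s) false).Perm (z :: t) :=
      PySem.List.sorted_perm _ _ _
    obtain ⟨s1, s2, s3, s4, s5⟩ := pv_go_spec (PySem.List.sorted (z :: t) (fun s => s) false) 0 []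
      hsp le_rfl (by simp) List.nodup_nil
    set pool := PySem.List.sorted (z :: t) (fun s => s) false with hpool
    set r := pvRunScanGo pool 0 [] with hrdef
    have hcnt : ∀ y, pool.count y = (z :: t).count y := fun y => hperm.count_eq y
    have hzpool : z ∈ pool := hperm.mem_iff.mpr List.mem_cons_self
    have hr1pos : 1 ≤ r.1 := by
      have h1 : 0 < pool.count z := List.count_pos_iff.mpr hzpool
      have := s2 z hzpool
      omega
    obtain ⟨w, hw, hwc⟩ : ∃ y ∈ pool, (pool.count y : Int) = r.1 := by
      rcases s3 with h | h
      · exact absurd h (by omega)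
      · exact h
    -- A's counter items
    have hitems : (PySem.Dict.counter (z :: t)).items
        = (PySem.Set.ofList (z :: t)).map (fun k => (k, ((z :: t).count k : Int))) :=
      PySem.Dict.items_counter _
    have hinn : (PySem.Dict.counter (z :: t)).items ≠ [] := by
      rw [hitems]
      intro h
      have hz : z ∈ PySem.Set.ofList (z :: t) := (PySem.Set.mem_ofList _ _).mpr List.mem_cons_self
      rw [List.map_eq_nil_iff.mp h] at hz
      exact List.not_mem_nil hz
    obtain ⟨kv, hkv⟩ : ∃ kv, PySem.List.max? (PySem.Dict.counter (z :: t)).items (fun kv => kv.2) = some kv := by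
      cases hmx : PySem.List.max? (PySem.Dict.counter (z :: t)).items (fun kv => kv.2) with
      | none => exact absurd ((PySem.List.max?_eq_none_iff _ _).mp hmx) hinn
      | some kv => exact ⟨kv, rfl⟩
    have hkvmem := PySem.List.max?_mem hkv
    have hkvmax := PySem.List.max?_isMax hkv
    have hmaxval : (((PySem.List.max? (PySem.Dict.counter (z :: t)).items (fun kv => kv.2)).map
        (fun kv => kv.2)).getD 0) = kv.2 := by rw [hkv]; rfl
    -- kv is a (key, count) pair
    obtain ⟨k0, hk0mem, hk0eq⟩ : ∃ k0 ∈ PySem.Set.ofList (z :: t), kv = (k0, ((z :: t).count k0 : Int)) := by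
      rw [hitems] at hkvmem
      obtain ⟨k0, hk0, hk0eq⟩ := List.mem_map.mp hkvmem
      exact ⟨k0, hk0, hk0eq.symm⟩
    have hk0l : k0 ∈ (z :: t) := (PySem.Set.mem_ofList _ _).mp hk0mem
    have hk0pool : k0 ∈ pool := hperm.mem_iff.mpr hk0l
    -- all item counts are ≤ kv.2, and each key's count is an item count
    have hub : ∀ y ∈ (z :: t), ((z :: t).count y : Int) ≤ kv.2 := by
      intro y hy
      have hyit : (y, ((z :: t).count y : Int)) ∈ (PySem.Dict.counter (z :: t)).items := by
        rw [hitems]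
        exact List.mem_map.mpr ⟨y, (PySem.Set.mem_ofList _ _).mpr hy, rfl⟩
      exact hkvmax _ hyit
    have hkv2 : kv.2 = ((z :: t).count k0 : Int) := by rw [hk0eq]
    have hmx_eq : kv.2 = r.1 := by
      have h1 : kv.2 ≤ r.1 := by
        have := s2 k0 hk0pool
        have := hcnt k0
        omega
      have h2 : r.1 ≤ kv.2 := by
        have hwl : w ∈ (z :: t) := hperm.mem_iff.mp hw
        have := hub w hwl
        have := hcnt w
        omega
      omega
    -- unfold both sides
    simp only [pvContribA, pvContribB, List.isEmpty_cons, Bool.false_eq_true, if_false, hmaxval]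
    rw [← hrdef]
    by_cases h2 : kv.2 < 2
    · rw [if_pos h2, if_neg (by omega)]
    · rw [if_neg h2, if_pos (by omega)]
      -- A's list as a filter of the key set
      have hA : ((PySem.Dict.counter (z :: t)).items.filter (fun kv' => kv'.2 == kv.2)).map (fun kv' => kv'.1)
          = (PySem.Set.ofList (z :: t)).filter (fun k => ((z :: t).count k : Int) == kv.2) := by
        rw [hitems, List.filter_map, List.map_map]
        simp [Function.comp_def]
      rw [hA]
      apply (List.perm_ext_iff_of_nodup (List.Nodup.filter _ (PySem.Set.nodup_ofList _)) s5).mpr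
      intro y
      rw [List.mem_filter, s4 y]
      simp only [List.not_mem_nil, false_and, false_or]
      constructor
      · rintro ⟨hy, hc⟩
        have hyl : y ∈ (z :: t) := (PySem.Set.mem_ofList _ _).mp hy
        have hcc : ((z :: t).count y : Int) = kv.2 := by simpa using hc
        have := hcnt y
        exact ⟨hperm.mem_iff.mpr hyl, by omega⟩
      · rintro ⟨hy, hc⟩
        have hyl : y ∈ (z :: t) := hperm.mem_iff.mp hy
        have := hcnt y
        exact ⟨(PySem.Set.mem_ofList _ _).mpr hyl, by simp; omega⟩

lemma pv_fold_perm (course : List Int) (f g : Int → List String)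
    (h : ∀ n, (f n).Perm (g n)) :
    ∀ (a b : List String), a.Perm b →
      (course.foldl (fun ans n => ans ++ f n) a).Perm (course.foldl (fun ans n => ans ++ g n) b) := by
  induction course with
  | nil => intro a b hab; exact hab
  | cons c rest ih =>
      intro a b hab
      exact ih _ _ (hab.append (h c))

-- ===== VERDICT (by name: the statement is the Claim_ definition above) =====
theorem solution_spec : Claim_equal_solution := by
  intro orders course _ _
  unfold Spec_solution
  simp only [solution, solution_alt]
  apply PySem.List.sorted_eq_sorted_of_perm _ _ _ (fun a b hab => hab)
  rw [pvA_shape (orders.map pvNorm) course, pvB_shape (orders.map pvNorm) course]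
  exact pv_fold_perm course _ _ (fun n => pv_contrib_perm (pvAllList (orders.map pvNorm) n.toNat)) [] [] (List.Perm.refl [])
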